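-- pv_equiv track=rewrite | github.com/ycmin95/Chalearn_2022_Sign_Spotting_MSSL_track | dataset/preprocess/6_label_generation.py | generate_labels_start_end_time
-- ===== SOURCE A (Python) =====
-- def generate_labels_start_end_time(framewise_labels, bg_class=['background']):
--     labels = []
--     starts = []
--     ends = []
--     last_label = framewise_labels[0]
--     if framewise_labels[0] not in bg_class:
--         labels.append(framewise_labels[0])
--         starts.append(0)
--     for i in range(len(framewise_labels)):
--         if framewise_labels[i] != last_label:
--             if framewise_labels[i] not in bg_class:
--                 labels.append(framewise_labels[i])
--                 starts.append(i)
--             if last_label not in bg_class: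
--                 ends.append(i - 1)
--             last_label = framewise_labels[i]
--     if last_label not in bg_class:
--         ends.append(i)
--     return labels, starts, ends
-- ===== SOURCE B (Python) =====
-- def generate_labels_start_end_time(framewise_labels, bg_class=['background']):
--     # Pass 1: run-length encode into (label, start, inclusive_end) runs.
--     runs = []
--     n = len(framewise_labels)
--     i = 0
--     while i < n:
--         j = i
--         while j + 1 < n and framewise_labels[j + 1] == framewise_labels[i]:
--             j += 1
--         runs.append((framewise_labels[i], i, j))
--         i = j + 1
--     # Pass 2: keep only non-background runs.
--     labels, starts, ends = [], [], []
--     for label, s, e in runs: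
--         if label not in bg_class:
--             labels.append(label)
--             starts.append(s)
--             ends.append(e)
--     return labels, starts, ends
-- ===== Notes on version B (the rewrite author's own statement) =====
-- stated objective: simpler
-- what changed: B first run-length encodes the frames into (label, start, inclusive end) runs and then filters out background runs in a second pass, instead of A's single stateful loop with a last_label register and conditional appends at run boundaries.
import Mathlib
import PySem

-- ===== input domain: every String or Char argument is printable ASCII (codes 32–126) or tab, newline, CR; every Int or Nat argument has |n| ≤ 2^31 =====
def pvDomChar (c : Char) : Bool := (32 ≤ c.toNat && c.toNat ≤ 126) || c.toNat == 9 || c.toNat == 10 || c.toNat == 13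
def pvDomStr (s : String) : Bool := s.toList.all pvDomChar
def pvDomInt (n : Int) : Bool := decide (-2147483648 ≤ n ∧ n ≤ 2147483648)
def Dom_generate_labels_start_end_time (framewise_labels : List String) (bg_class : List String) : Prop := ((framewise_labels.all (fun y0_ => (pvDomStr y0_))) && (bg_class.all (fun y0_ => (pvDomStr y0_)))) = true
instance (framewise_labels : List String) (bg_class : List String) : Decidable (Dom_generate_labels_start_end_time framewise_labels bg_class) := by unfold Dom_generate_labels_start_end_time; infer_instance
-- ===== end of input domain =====

-- B builds the run-length (label, start, inclusive end) structure first and then filters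
-- background runs in a second pass — a simpler two-pass decomposition of A's stateful loop.
-- Pre_ excludes the empty frame list, on which A raises IndexError.


-- ===== PORT A =====
-- A's for-loop over range(len(framewise_labels)) as structural recursion over the list,
-- carrying the index i and the loop state (labels, starts, ends, last_label).
def pvLoopA (bg_class : List String) : List String → Int → List String × List Int × List Int × String → List String × List Int × List Int × String
  | [], _, st => st
  | cur :: rest, i, (labels, starts, ends, last_label) =>
    if cur ≠ last_label then
      pvLoopA bg_class rest (i + 1)
        ((if cur ∈ bg_class then labels else labels ++ [cur]),
         (if cur ∈ bg_class then starts else starts ++ [i]),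
         (if last_label ∈ bg_class then ends else ends ++ [i - 1]),
         cur)
    else
      pvLoopA bg_class rest (i + 1) (labels, starts, ends, last_label)

def generate_labels_start_end_time (framewise_labels : List String) (bg_class : List String) : List String × List Int × List Int :=
  match framewise_labels with
  | [] => ([], [], [])  -- A raises IndexError here (framewise_labels[0]); excluded by Pre_
  | f0 :: _ =>
    let labels0 : List String := if f0 ∈ bg_class then [] else [f0]
    let starts0 : List Int := if f0 ∈ bg_class then [] else [0]
    match pvLoopA bg_class framewise_labels 0 (labels0, starts0, [], f0) with
    | (labels, starts, ends, last_label) =>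
      (labels, starts,
        if last_label ∈ bg_class then ends else ends ++ [(framewise_labels.length : Int) - 1])

-- ===== PORT B =====
-- Pass 1 of Source B (the index scan with the inner `while` extending the current run),
-- as structural recursion: state (current run label x, its start s, last index j of the
-- run so far); an equal next frame extends the run, an unequal one closes it at j.
def pvScan : String → Int → Int → List String → List (String × Int × Int)
  | x, s, j, [] => [(x, s, j)]
  | x, s, j, y :: ys =>
    if y = x then pvScan x s (j + 1) ys
    else (x, s, j) :: pvScan y (j + 1) (j + 1) ys

def pvRuns (framewise_labels : List String) : List (String × Int × Int) :=
  match framewise_labels with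
  | [] => []
  | x :: ys => pvScan x 0 0 ys

-- Pass 2 of Source B: keep only non-background runs.
def generate_labels_start_end_time_alt (framewise_labels : List String) (bg_class : List String) : List String × List Int × List Int :=
  (pvRuns framewise_labels).foldl
    (fun (acc : List String × List Int × List Int) r =>
      if r.1 ∈ bg_class then acc
      else (acc.1 ++ [r.1], acc.2.1 ++ [r.2.1], acc.2.2 ++ [r.2.2]))
    ([], [], [])

-- ===== PRECONDITION & SPEC =====
-- A dereferences framewise_labels[0]: it raises IndexError exactly on the empty list.
def Pre_generate_labels_start_end_time (framewise_labels : List String) (bg_class : List String) : Prop := framewise_labels ≠ []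
instance (framewise_labels : List String) (bg_class : List String) : Decidable (Pre_generate_labels_start_end_time framewise_labels bg_class) := by unfold Pre_generate_labels_start_end_time; infer_instance
def pvWitness_generate_labels_start_end_time : List String × List String := (["a", "a", "background", "b"], ["background"])

def Spec_generate_labels_start_end_time (framewise_labels : List String) (bg_class : List String) (out : List String × List Int × List Int) : Prop := out = generate_labels_start_end_time_alt framewise_labels bg_class
instance (framewise_labels : List String) (bg_class : List String) (out : List String × List Int × List Int) : Decidable (Spec_generate_labels_start_end_time framewise_labels bg_class out) := by unfold Spec_generate_labels_start_end_time; infer_instance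

-- ===== CLAIM (what is proved, stated in full; the proofs are below) =====
def Claim_equal_generate_labels_start_end_time : Prop := ∀ (framewise_labels : List String) (bg_class : List String), Dom_generate_labels_start_end_time framewise_labels bg_class → Pre_generate_labels_start_end_time framewise_labels bg_class → Spec_generate_labels_start_end_time framewise_labels bg_class (generate_labels_start_end_time framewise_labels bg_class)
-- ===== LEMMAS AND PROOFS =====

-- the labels / starts / ends that B's filter pass extracts from a run list
def pvRL (bg : List String) (rs : List (String × Int × Int)) : List String :=
  (rs.filter (fun r => ¬ r.1 ∈ bg)).map (·.1)
def pvRS (bg : List String) (rs : List (String × Int × Int)) : List Int :=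
  (rs.filter (fun r => ¬ r.1 ∈ bg)).map (·.2.1)
def pvRE (bg : List String) (rs : List (String × Int × Int)) : List Int :=
  (rs.filter (fun r => ¬ r.1 ∈ bg)).map (·.2.2)

theorem pvEmit_eq (bg : List String) (rs : List (String × Int × Int)) (L : List String) (S E : List Int) :
    rs.foldl (fun (acc : List String × List Int × List Int) r =>
      if r.1 ∈ bg then acc
      else (acc.1 ++ [r.1], acc.2.1 ++ [r.2.1], acc.2.2 ++ [r.2.2])) (L, S, E)
    = (L ++ pvRL bg rs, S ++ pvRS bg rs, E ++ pvRE bg rs) := by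
  induction rs generalizing L S E with
  | nil => simp [pvRL, pvRS, pvRE]
  | cons r rs ih =>
    simp only [List.foldl_cons, pvRL, pvRS, pvRE, List.filter_cons]
    by_cases h : r.1 ∈ bg <;> simp [h, ih, pvRL, pvRS, pvRE]

def pvFinish (bg : List String) (e : Int) (st : List String × List Int × List Int × String) : List String × List Int × List Int :=
  (st.1, st.2.1, if st.2.2.2 ∈ bg then st.2.2.1 else st.2.2.1 ++ [e])

-- main invariant: A's loop from state (L,S,E,prev) at index i — where prev's run started
-- at s and its opening label/start are already recorded — closed at the final index,
-- equals B's filtered columns of the scan continuing prev's run.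
theorem pvMain (bg : List String) (xs : List String) (i : Int) (prev : String)
    (s : Int) (L : List String) (S E : List Int) :
    pvFinish bg (i + (xs.length : Int) - 1)
      (pvLoopA bg xs i
        (L ++ (if prev ∈ bg then [] else [prev]),
         S ++ (if prev ∈ bg then [] else [s]), E, prev))
    = (L ++ pvRL bg (pvScan prev s (i - 1) xs),
       S ++ pvRS bg (pvScan prev s (i - 1) xs),
       E ++ pvRE bg (pvScan prev s (i - 1) xs)) := by
  induction xs generalizing i prev s L S E with
  | nil =>
    simp only [pvLoopA, pvScan, pvFinish, pvRL, pvRS, pvRE, List.filter_cons, List.filter_nil,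
      List.length_nil, Nat.cast_zero]
    by_cases h : prev ∈ bg <;> simp [h]
  | cons y ys ih =>
    simp only [List.length_cons]
    push_cast
    rw [show i + ((ys.length : Int) + 1) - 1 = (i + 1) + (ys.length : Int) - 1 from by omega]
    by_cases hy : y = prev
    · subst hy
      simp only [pvLoopA, ne_eq, not_true_eq_false, if_false]
      rw [ih (i + 1) y s L S E]
      rw [show i + 1 - 1 = i - 1 + 1 from by omega]
      simp [pvScan]
    · simp only [pvLoopA, ne_eq, hy, not_false_eq_true, if_true]
      have harr : (if y ∈ bg then L ++ (if prev ∈ bg then [] else [prev])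
            else (L ++ (if prev ∈ bg then [] else [prev])) ++ [y])
          = (L ++ (if prev ∈ bg then [] else [prev])) ++ (if y ∈ bg then [] else [y]) := by
        by_cases h : y ∈ bg <;> simp [h]
      have harr2 : (if y ∈ bg then S ++ (if prev ∈ bg then [] else [s])
            else (S ++ (if prev ∈ bg then [] else [s])) ++ [i])
          = (S ++ (if prev ∈ bg then [] else [s])) ++ (if y ∈ bg then [] else [i]) := by
        by_cases h : y ∈ bg <;> simp [h]
      have harr3 : (if prev ∈ bg then E else E ++ [i - 1])
          = E ++ (if prev ∈ bg then [] else [i - 1]) := by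
        by_cases h : prev ∈ bg <;> simp [h]
      rw [harr, harr2, harr3]
      rw [ih (i + 1) y i
        (L ++ (if prev ∈ bg then [] else [prev]))
        (S ++ (if prev ∈ bg then [] else [s]))
        (E ++ (if prev ∈ bg then [] else [i - 1]))]
      have hscan : pvScan prev s (i - 1) (y :: ys)
          = (prev, s, i - 1) :: pvScan y (i + 1 - 1) (i + 1 - 1) ys := by
        rw [pvScan, if_neg hy]
        rw [show i - 1 + 1 = i + 1 - 1 from by omega]
      rw [hscan, show i + 1 - 1 = i from by omega]
      simp only [pvRL, pvRS, pvRE, List.filter_cons]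
      by_cases h : prev ∈ bg <;> simp [h]

-- ===== VERDICT (by name: the statement is the Claim_ definition above) =====
theorem generate_labels_start_end_time_spec : Claim_equal_generate_labels_start_end_time := by
  intro fw bg _ hpre
  unfold Spec_generate_labels_start_end_time
  match fw with
  | [] => exact absurd rfl hpre
  | f0 :: tl =>
    unfold generate_labels_start_end_time generate_labels_start_end_time_alt
    simp only [pvRuns]
    rw [pvEmit_eq]
    have h0 : pvLoopA bg (f0 :: tl) 0
        ((if f0 ∈ bg then [] else [f0]), (if f0 ∈ bg then [] else [(0 : Int)]), [], f0)
        = pvLoopA bg tl 1 ((if f0 ∈ bg then [] else [f0]), (if f0 ∈ bg then [] else [(0 : Int)]), [], f0) := by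
      simp [pvLoopA]
    have hmain := pvMain bg tl 1 f0 0 [] [] []
    simp only [List.nil_append] at hmain
    rw [show (1 : Int) - 1 = 0 from rfl] at hmain
    show pvFinish bg (((f0 :: tl).length : Int) - 1) _ = _
    simp only [h0, List.length_cons]
    push_cast
    rw [show (tl.length : Int) + 1 - 1 = 1 + (tl.length : Int) - 1 from by omega]
    exact hmain
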